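-- pv_equiv track=rewrite | github.com/sivansalzmann/Tweets-Python | Tweets.py | findMaxUser
-- ===== SOURCE A (Python) =====
-- def findMaxUser(npArray):
--     l = list()
--     for i in npArray:
--         l.append(i)
--     counter = 0
--     ele = l[0]
--     for i in l:
--         curr_frequency = l.count(i)
--         if (curr_frequency > counter):
--             counter = curr_frequency
--             ele = i
--     return ele
-- ===== SOURCE B (Python) =====
-- def findMaxUser(npArray):
--     counts = {}
--     for i in npArray:
--         counts[i] = counts.get(i, 0) + 1
--     return max(counts, key=counts.get)
-- ===== Notes on version B (the rewrite author's own statement) =====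
-- stated objective: faster
-- what changed: A recomputes list.count for every element (quadratic scan with first-strictly-greater tie-break); B builds a frequency dict in one pass and takes max over its keys with key=counts.get, whose first-key tie-break equals A's winner.
import Mathlib
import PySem

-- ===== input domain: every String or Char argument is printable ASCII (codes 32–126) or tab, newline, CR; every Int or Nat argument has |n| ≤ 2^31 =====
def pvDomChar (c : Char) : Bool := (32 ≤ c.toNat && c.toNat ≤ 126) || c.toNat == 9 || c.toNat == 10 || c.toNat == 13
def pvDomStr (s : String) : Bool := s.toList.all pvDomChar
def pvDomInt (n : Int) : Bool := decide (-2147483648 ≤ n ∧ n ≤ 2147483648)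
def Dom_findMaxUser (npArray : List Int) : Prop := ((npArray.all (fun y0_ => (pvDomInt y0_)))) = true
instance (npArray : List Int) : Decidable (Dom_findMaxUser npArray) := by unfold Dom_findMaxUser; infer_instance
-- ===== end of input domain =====

-- B replaces A's quadratic scan (list.count inside the loop) by one counting pass into a
-- dict plus max over the distinct keys (Python's max keeps the first key attaining the
-- maximum, which is A's first-reaching-max tie-break).

-- ===== PORT A =====
def findMaxUser (npArray : List Int) : Int :=
  let l := npArray.foldl (fun acc i => acc ++ [i]) []
  let ele := (PySem.List.pyGet? l 0).getD 0
  (l.foldl (fun (s : Int × Int) i =>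
      let curr : Int := (PySem.List.count l i : Int)
      if curr > s.1 then (curr, i) else s) ((0 : Int), ele)).2

-- ===== PORT B =====
def findMaxUser_alt (npArray : List Int) : Int :=
  let counts := npArray.foldl
      (fun (d : PySem.Dict Int Int) x => d.insert x (d.getD x 0 + 1)) PySem.Dict.empty
  (PySem.List.max? counts.keys (fun k => counts.getD k 0)).getD 0

-- ===== PRECONDITION & SPEC =====
-- Pre_ excludes only the empty list, on which A raises IndexError (l[0]).
def Pre_findMaxUser (npArray : List Int) : Prop := npArray ≠ []
instance (npArray : List Int) : Decidable (Pre_findMaxUser npArray) := by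
  unfold Pre_findMaxUser; infer_instance

def pvWitness_findMaxUser : List Int := [1, 2, 2]

def Spec_findMaxUser (npArray : List Int) (out : Int) : Prop := out = findMaxUser_alt npArray
instance (npArray : List Int) (out : Int) : Decidable (Spec_findMaxUser npArray out) := by
  unfold Spec_findMaxUser; infer_instance

-- ===== CLAIM (what is proved, stated in full; the proofs are below) =====
def Claim_equal_findMaxUser : Prop := ∀ (npArray : List Int), Dom_findMaxUser npArray → Pre_findMaxUser npArray → Spec_findMaxUser npArray (findMaxUser npArray)

-- ===== LEMMAS AND PROOFS =====

/-- Count of `y` in the fixed reference list, as an Int. -/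
def pvCnt (l : List Int) (y : Int) : Int := (List.count y l : Int)

/-- The "keep the first strictly-greater-count element" step both programs perform. -/
def pvBest (l : List Int) (m y : Int) : Int := if pvCnt l y > pvCnt l m then y else m

-- A's pair-state fold is the pvBest fold once the counter component equals the count
-- of the current best element.
theorem pvPairFold (l : List Int) (ys : List Int) (a : Int) :
    (ys.foldl (fun (s : Int × Int) i =>
        if (PySem.List.count l i : Int) > s.1 then ((PySem.List.count l i : Int), i) else s)
      (pvCnt l a, a)).2 = ys.foldl (pvBest l) a := by
  induction ys generalizing a with
  | nil => rfl
  | cons y t ih =>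
    simp only [List.foldl_cons, PySem.List.count_eq, pvBest, pvCnt]
    split_ifs with h
    · exact ih y
    · exact ih a

-- elements whose count is already dominated can be dropped from the fold
theorem pvBest_skip (l : List Int) (t : List Int) (a z : Int) (h : pvCnt l z ≤ pvCnt l a) :
    t.foldl (pvBest l) a = (t.filter (fun y => y != z)).foldl (pvBest l) a := by
  induction t generalizing a with
  | nil => rfl
  | cons y t ih =>
    by_cases hy : y = z
    · subst hy
      have hb : pvBest l a y = a := by unfold pvBest; split_ifs with hgt <;> omega
      simp only [List.filter_cons, bne_self_eq_false, List.foldl_cons, hb]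
      exact ih a h
    · have hm : pvCnt l z ≤ pvCnt l (pvBest l a y) := by
        unfold pvBest; split_ifs with hgt <;> omega
      have hfy : ((y : Int) != z) = true := by simpa using hy
      simp only [List.filter_cons, hfy, if_true, List.foldl_cons]
      exact ih (pvBest l a y) hm

theorem pvAdd_cons (z : Int) (t s : List Int) (hz : z ∉ t) :
    t.foldl PySem.Set.add (z :: s) = z :: t.foldl PySem.Set.add s := by
  induction t generalizing s with
  | nil => rfl
  | cons w t ih =>
    have hwz : w ≠ z := by intro h; exact hz (h ▸ List.mem_cons_self)
    have hz' : z ∉ t := fun h => hz (List.mem_cons_of_mem _ h)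
    have : PySem.Set.add (z :: s) w = z :: PySem.Set.add s w := by
      simp only [PySem.Set.add, PySem.Set.contains, List.contains_cons]
      have : (w == z) = false := by simpa using hwz
      rw [this]
      split_ifs <;> simp_all
    simp only [List.foldl_cons, this, ih _ hz']

theorem pvAdd_seen (z : Int) (t s : List Int) (hz : z ∈ s) :
    t.foldl PySem.Set.add s = (t.filter (fun y => y != z)).foldl PySem.Set.add s := by
  induction t generalizing s with
  | nil => rfl
  | cons w t ih =>
    by_cases hwz : w = z
    · subst hwz
      have : PySem.Set.add s w = s := by
        simp only [PySem.Set.add]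
        rw [if_pos]
        simp only [PySem.Set.contains, List.contains_iff_mem]; exact hz
      simp only [List.filter_cons, bne_self_eq_false, List.foldl_cons, this]
      exact ih s hz
    · have hz' : z ∈ PySem.Set.add s w := by
        simp only [PySem.Set.add]; split_ifs with h
        · exact hz
        · exact List.mem_append_left _ hz
      have hfw : ((w : Int) != z) = true := by simpa using hwz
      simp only [List.filter_cons, hfw, if_true, List.foldl_cons]
      exact ih (PySem.Set.add s w) hz'

theorem pvOfList_cons (z : Int) (t : List Int) :
    PySem.Set.ofList (z :: t) = z :: PySem.Set.ofList (t.filter (fun y => y != z)) := by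
  have h1 : PySem.Set.ofList (z :: t) = t.foldl PySem.Set.add [z] := by
    rw [PySem.Set.ofList_eq_foldl]; rfl
  have h2 : PySem.Set.ofList (t.filter (fun y => y != z))
      = (t.filter (fun y => y != z)).foldl PySem.Set.add [] := PySem.Set.ofList_eq_foldl _
  have hzf : z ∉ t.filter (fun y => y != z) := by simp
  rw [h1, pvAdd_seen z t [z] (List.mem_singleton.mpr rfl),
      pvAdd_cons z _ [] hzf, h2]

-- the fold over the list equals the fold over its first-occurrence dedup
theorem pvBest_dedup (l : List Int) (n : Nat) (t : List Int) (hn : t.length ≤ n) (a : Int) :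
    t.foldl (pvBest l) a = (PySem.Set.ofList t).foldl (pvBest l) a := by
  induction n generalizing t a with
  | zero =>
    have : t = [] := List.eq_nil_of_length_eq_zero (Nat.le_zero.mp hn)
    subst this; rfl
  | succ n ih =>
    cases t with
    | nil => rfl
    | cons z t =>
      have hcz : pvCnt l z ≤ pvCnt l (pvBest l a z) := by
        unfold pvBest; split_ifs with h <;> omega
      have hlen : (t.filter (fun y => y != z)).length ≤ n := by
        have := List.length_filter_le (fun y => y != z) t
        simp only [List.length_cons] at hn; omega
      rw [pvOfList_cons]
      simp only [List.foldl_cons]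
      rw [pvBest_skip l t (pvBest l a z) z hcz, ih _ hlen]

-- A, on a nonempty list, is the pvBest fold over the whole list
theorem pvA_eq (x : Int) (xs : List Int) :
    findMaxUser (x :: xs) = (x :: xs).foldl (pvBest (x :: xs)) x := by
  unfold findMaxUser
  simp only [PySem.List.foldl_append_singleton_eq_self, List.nil_append]
  have hget : (PySem.List.pyGet? (x :: xs) 0).getD 0 = x := by
    simp [PySem.List.pyGet?, PySem.List.pyIdx?]
  rw [hget]
  have hpos : (0 : Int) < (PySem.List.count (x :: xs) x : Int) := by
    rw [PySem.List.count_eq]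
    exact_mod_cast List.count_pos_iff.mpr List.mem_cons_self
  simp only [List.foldl_cons, gt_iff_lt, hpos, if_pos]
  have hc : ((PySem.List.count (x :: xs) x : Int)) = pvCnt (x :: xs) x := by
    simp [pvCnt, PySem.List.count_eq]
  rw [hc, pvPairFold]
  have hself : pvBest (x :: xs) x x = x := by unfold pvBest; simp
  simp [hself]

-- B, on a nonempty list, is the pvBest fold over the first-occurrence dedup
theorem pvMaxFold (l : List Int) (t : List Int) (a : Int) :
    PySem.List.max? (a :: t) (pvCnt l) = some (t.foldl (pvBest l) a) := by
  unfold PySem.List.max?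
  simp only [List.foldl_cons]
  induction t generalizing a with
  | nil => rfl
  | cons y t ih =>
    simp only [List.foldl_cons, pvBest, gt_iff_lt]
    split_ifs with h
    · exact ih y
    · exact ih a

theorem pvB_eq (x : Int) (xs : List Int) :
    findMaxUser_alt (x :: xs) = (PySem.Set.ofList (x :: xs)).foldl (pvBest (x :: xs)) x := by
  set l := x :: xs with hl
  unfold findMaxUser_alt
  simp only [PySem.Dict.foldl_insert_getD_add_one_eq_counter, PySem.Dict.keys_counter]
  have hkey : (fun k => (PySem.Dict.counter l).getD k 0) = pvCnt l := by
    funext k; simp [pvCnt, PySem.Dict.getD_counter]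
  rw [hkey]
  have hcons : PySem.Set.ofList l = x :: PySem.Set.ofList (xs.filter (fun y => y != x)) :=
    pvOfList_cons x xs
  rw [hcons, pvMaxFold l]
  have hself : pvBest l x x = x := by unfold pvBest; simp
  simp only [Option.getD_some, List.foldl_cons, hself]

-- ===== VERDICT (by name: the statement is the Claim_ definition above) =====
theorem findMaxUser_spec : Claim_equal_findMaxUser := by
  intro npArray _ hpre
  unfold Spec_findMaxUser
  cases npArray with
  | nil => exact absurd rfl hpre
  | cons x xs =>
    rw [pvA_eq, pvB_eq,
        pvBest_dedup (x :: xs) (x :: xs).length (x :: xs) le_rfl x]
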